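-- pv_equiv track=rewrite | github.com/FSSCoding/Fss-Mini-Rag | mini_rag/chunker.py | _compute_paragraph_positions
-- ===== SOURCE A (Python) =====
-- from typing import Any, Dict, List, Optional, Tuple
--
-- def _compute_paragraph_positions(content: str, paragraphs: List[str]) -> List[int]:
--     """Compute the 1-based starting line number of each paragraph.
--
--     Scans the original content to find where each paragraph begins,
--     avoiding the line-drift caused by assuming +2 per gap.
--     """
--     positions = []
--     search_start = 0
--     for para in paragraphs:
--         if not para:
--             # Empty paragraph from split — find it by advancing past \n\n
--             positions.append(content[:search_start].count('\n') + 1)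
--             # Advance past the empty region
--             search_start += 2  # the \n\n that produced this empty string
--             continue
--         idx = content.find(para, search_start)
--         if idx == -1:
--             # Fallback: use current position
--             positions.append(content[:search_start].count('\n') + 1)
--         else:
--             positions.append(content[:idx].count('\n') + 1)
--             search_start = idx + len(para)
--     return positions
-- ===== SOURCE B (Python) =====
-- from typing import List
--
-- def _compute_paragraph_positions(content: str, paragraphs: List[str]) -> List[int]:
--     """One forward pass: keep a scan pointer and a running newline count and
--     advance them monotonically, instead of re-counting every prefix of content
--     for each paragraph."""
--     n = len(content)
--     positions = []
--     search_start = 0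
--     line = 1      # 1 + newlines in content[:counted]
--     counted = 0   # scan pointer; never moves backward
--
--     def advance(target):
--         nonlocal line, counted
--         t = min(target, n)
--         while counted < t:
--             if content[counted] == '\n':
--                 line += 1
--             counted += 1
--
--     for para in paragraphs:
--         if not para:
--             advance(search_start)
--             positions.append(line)
--             search_start += 2
--             continue
--         idx = content.find(para, search_start)
--         if idx == -1:
--             advance(search_start)
--             positions.append(line)
--         else:
--             advance(idx)
--             positions.append(line)
--             search_start = idx + len(para)
--     return positions
-- ===== Notes on version B (the rewrite author's own statement) =====
-- stated objective: faster
-- what changed: Replaces A's per-paragraph recount of newlines over a growing prefix (content[:idx].count('\n') for every paragraph) by a single monotone forward scan that keeps a running newline count and scan pointer, so each character of content is examined at most once for line counting.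
import Mathlib
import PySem

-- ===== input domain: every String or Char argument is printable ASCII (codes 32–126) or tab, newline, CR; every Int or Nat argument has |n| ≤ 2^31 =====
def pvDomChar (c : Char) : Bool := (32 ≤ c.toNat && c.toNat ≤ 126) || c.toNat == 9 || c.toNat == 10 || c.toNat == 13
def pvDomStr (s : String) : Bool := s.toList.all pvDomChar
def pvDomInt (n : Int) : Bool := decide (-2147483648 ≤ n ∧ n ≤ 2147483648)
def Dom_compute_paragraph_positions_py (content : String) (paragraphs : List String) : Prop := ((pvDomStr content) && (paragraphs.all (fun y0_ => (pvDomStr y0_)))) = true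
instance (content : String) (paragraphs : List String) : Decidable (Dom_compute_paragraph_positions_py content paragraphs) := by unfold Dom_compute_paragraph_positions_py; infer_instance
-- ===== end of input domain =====

-- B replaces A's per-paragraph re-count of '\n' over a growing prefix by one monotone
-- forward scan with a running newline count (objective: faster, asymptotic).

-- ===== PORT A =====
-- loop over paragraphs; state = (positions, search_start), exactly A's loop
def pvA_loop (cs : List Char) : List String → List Int → Int → List Int
  | [], positions, _ => positions
  | para :: rest, positions, ss =>
    if para.toList.isEmpty then
      pvA_loop cs rest
        (positions ++ [((PySem.Chars.count (PySem.Chars.slice cs none (some ss)) "\n".toList : Int) + 1)])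
        (ss + 2)
    else
      let idx := PySem.Chars.findFrom cs para.toList ss
      if idx = -1 then
        pvA_loop cs rest
          (positions ++ [((PySem.Chars.count (PySem.Chars.slice cs none (some ss)) "\n".toList : Int) + 1)]) ss
      else
        pvA_loop cs rest
          (positions ++ [((PySem.Chars.count (PySem.Chars.slice cs none (some idx)) "\n".toList : Int) + 1)])
          (idx + PySem.Chars.len para.toList)

def compute_paragraph_positions_py (content : String) (paragraphs : List String) : List Int :=
  pvA_loop content.toList paragraphs [] 0

-- ===== PORT B =====
-- Source B's advance(target): scan from `counted` up to t = min(target, n), bumping `line` at '\n'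
def pvAdvance (cs : List Char) (line : Int) (counted t : Nat) : Int × Nat :=
  if h : counted < t ∧ counted < cs.length then
    pvAdvance cs (if cs[counted]'h.2 = '\n' then line + 1 else line) (counted + 1) t
  else (line, counted)
termination_by t - counted
decreasing_by omega

-- Source B's main loop; state = (positions, search_start, line, counted)
def pvB_loop (cs : List Char) (n : Nat) : List String → List Int → Int → Int → Nat → List Int
  | [], positions, _, _, _ => positions
  | para :: rest, positions, ss, line, counted =>
    if para.toList.isEmpty then
      let lc := pvAdvance cs line counted (min ss.toNat n)
      pvB_loop cs n rest (positions ++ [lc.1]) (ss + 2) lc.1 lc.2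
    else
      let idx := PySem.Chars.findFrom cs para.toList ss
      if idx = -1 then
        let lc := pvAdvance cs line counted (min ss.toNat n)
        pvB_loop cs n rest (positions ++ [lc.1]) ss lc.1 lc.2
      else
        let lc := pvAdvance cs line counted (min idx.toNat n)
        pvB_loop cs n rest (positions ++ [lc.1]) (idx + PySem.Chars.len para.toList) lc.1 lc.2

def compute_paragraph_positions_py_alt (content : String) (paragraphs : List String) : List Int :=
  pvB_loop content.toList content.toList.length paragraphs [] 0 1 0

-- ===== PRECONDITION & SPEC =====
def Spec_compute_paragraph_positions_py (content : String) (paragraphs : List String) (out : List Int) : Prop := out = compute_paragraph_positions_py_alt content paragraphs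
instance (content : String) (paragraphs : List String) (out : List Int) : Decidable (Spec_compute_paragraph_positions_py content paragraphs out) := by unfold Spec_compute_paragraph_positions_py; infer_instance

-- ===== CLAIM (what is proved, stated in full; the proofs are below) =====
def Claim_equal_compute_paragraph_positions_py : Prop := ∀ (content : String) (paragraphs : List String), Dom_compute_paragraph_positions_py content paragraphs → Spec_compute_paragraph_positions_py content paragraphs (compute_paragraph_positions_py content paragraphs)

-- ===== LEMMAS AND PROOFS =====

-- Python str.count of a single character is List.count
theorem pv_count_go_singleton (c : Char) :
    ∀ (fuel : Nat) (l : List Char) (acc : Nat), l.length ≤ fuel →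
      PySem.Chars.count.go [c] fuel l acc = acc + l.count c := by
  intro fuel
  induction fuel with
  | zero =>
    intro l acc h
    have : l = [] := List.eq_nil_of_length_eq_zero (Nat.le_zero.mp h)
    subst this; simp [PySem.Chars.count.go]
  | succ m ih =>
    intro l acc h
    cases l with
    | nil => simp [PySem.Chars.count.go]
    | cons a t =>
      have ht : t.length ≤ m := by simpa using h
      by_cases hc : c = a
      · subst hc
        simp [PySem.Chars.count.go, List.isPrefixOf, ih t (acc + 1) ht]
        omega
      · have hpre : ([c].isPrefixOf (a :: t)) = false := by
          simp [List.isPrefixOf]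
          exact fun hh => hc hh
        simp [PySem.Chars.count.go, hpre, ih t acc ht, List.count_cons]
        exact fun hh => hc hh.symm

theorem pv_count_singleton (s : List Char) (c : Char) :
    PySem.Chars.count s [c] = s.count c := by
  simp [PySem.Chars.count]
  simpa using pv_count_go_singleton c s.length s 0 le_rfl

-- findFrom with a nonnegative start returns -1 or an index ≥ start
theorem pv_findFrom_ge (s sub : List Char) (start : Int) (h0 : 0 ≤ start)
    (hne : PySem.Chars.findFrom s sub start ≠ -1) :
    start ≤ PySem.Chars.findFrom s sub start := by
  have hlt : ¬ start < 0 := not_lt.mpr h0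
  simp only [PySem.Chars.findFrom, if_neg hlt] at hne ⊢
  split_ifs at hne ⊢ with h1 h2
  · exact absurd rfl hne
  · exact absurd rfl hne
  · have hr := PySem.Chars.neg_one_le_find (List.drop start.toNat (List.take (↑s.length : Int).toNat s)) sub
    omega

-- advance from a consistent state lands exactly at t with the prefix newline count
theorem pv_advance_spec (cs : List Char) :
    ∀ (counted t : Nat) (line : Int), counted ≤ t → t ≤ cs.length →
      line = ((cs.take counted).count '\n' : Int) + 1 →
      pvAdvance cs line counted t = (((cs.take t).count '\n' : Int) + 1, t) := by
  intro counted t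
  induction h : t - counted generalizing counted with
  | zero =>
    intro line h1 h2 h3
    have : counted = t := by omega
    subst this
    rw [pvAdvance]
    simp [h3]
  | succ m ih =>
    intro line h1 h2 h3
    have hlt : counted < t := by omega
    have hcl : counted < cs.length := by omega
    rw [pvAdvance]
    rw [dif_pos ⟨hlt, hcl⟩]
    have hstep : ((cs.take (counted + 1)).count '\n' : Int) =
        ((cs.take counted).count '\n' : Int) + (if cs[counted]'hcl = '\n' then 1 else 0) := by
      rw [List.take_add_one]
      have hg : cs[counted]? = some (cs[counted]'hcl) := List.getElem?_eq_getElem hcl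
      rw [hg]
      simp only [Option.toList_some, List.count_append]
      split_ifs with hh <;> simp [hh]
    apply ih (counted + 1) (by omega)
    · omega
    · omega
    · rw [hstep]
      split_ifs with hh
      · simp [h3]
      · simp [h3]

-- counting '\n' in take k clamps at the length
theorem pv_take_clamp (cs : List Char) (k : Nat) :
    cs.take k = cs.take (min k cs.length) := by
  rcases Nat.le_total k cs.length with h | h
  · simp [Nat.min_eq_left h]
  · rw [List.take_of_length_le h, Nat.min_eq_right h, List.take_length]

-- the main loop invariant: B's running scan state reproduces A's prefix counts
theorem pv_loop_eq (cs : List Char) :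
    ∀ (paras : List String) (positions : List Int) (ss line : Int) (counted : Nat),
      0 ≤ ss → counted ≤ min ss.toNat cs.length →
      line = ((cs.take counted).count '\n' : Int) + 1 →
      pvB_loop cs cs.length paras positions ss line counted = pvA_loop cs paras positions ss := by
  intro paras
  induction paras with
  | nil => intro _ _ _ _ _ _ _; simp [pvA_loop, pvB_loop]
  | cons para rest ih =>
    intro positions ss line counted hss hcnt hline
    have hadv : ∀ (p : Int), 0 ≤ p → counted ≤ min p.toNat cs.length →
        pvAdvance cs line counted (min p.toNat cs.length)
          = (((cs.take p.toNat).count '\n' : Int) + 1, min p.toNat cs.length) := by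
      intro p hp hc
      rw [pv_advance_spec cs counted (min p.toNat cs.length) line hc (Nat.min_le_right _ _) hline,
        ← pv_take_clamp]
    have hcount : ∀ (p : Int), 0 ≤ p →
        (PySem.Chars.count (PySem.Chars.slice cs none (some p)) "\n".toList : Int)
          = ((cs.take p.toNat).count '\n' : Int) := by
      intro p hp
      have hsl : PySem.Chars.slice cs none (some p) = cs.take p.toNat := by
        rw [PySem.Chars.slice_eq_listSlice]
        exact PySem.List.slice_to cs hp
      rw [hsl, show ("\n".toList) = ['\n'] from rfl, pv_count_singleton]
    have hfix : ∀ k : Nat, ((cs.take k).count '\n' : Int) + 1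
        = ((cs.take (min k cs.length)).count '\n' : Int) + 1 := fun k => by
      rw [← pv_take_clamp]
    by_cases hemp : para.toList.isEmpty
    · simp only [pvB_loop, pvA_loop, if_pos hemp]
      rw [hadv ss hss hcnt, hcount ss hss]
      exact ih _ (ss + 2) _ _ (by omega) (by omega) (hfix ss.toNat)
    · simp only [pvB_loop, pvA_loop, if_neg hemp]
      by_cases hI : PySem.Chars.findFrom cs para.toList ss = -1
      · rw [if_pos hI, if_pos hI, hadv ss hss hcnt, hcount ss hss]
        exact ih _ ss _ _ hss (by omega) (hfix ss.toNat)
      · rw [if_neg hI, if_neg hI]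
        have hge : ss ≤ PySem.Chars.findFrom cs para.toList ss :=
          pv_findFrom_ge cs para.toList ss hss hI
        have h0i : 0 ≤ PySem.Chars.findFrom cs para.toList ss := le_trans hss hge
        rw [hadv _ h0i (by omega), hcount _ h0i]
        have hlen : 0 ≤ PySem.Chars.len para.toList := by
          simp [PySem.Chars.len]
        exact ih _ (PySem.Chars.findFrom cs para.toList ss + PySem.Chars.len para.toList) _ _
          (by omega) (by omega) (hfix (PySem.Chars.findFrom cs para.toList ss).toNat)

-- ===== VERDICT (by name: the statement is the Claim_ definition above) =====
theorem compute_paragraph_positions_py_spec : Claim_equal_compute_paragraph_positions_py := by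
  intro content paragraphs _
  unfold Spec_compute_paragraph_positions_py compute_paragraph_positions_py compute_paragraph_positions_py_alt
  exact (pv_loop_eq content.toList paragraphs [] 0 1 0 le_rfl (by simp) (by simp)).symm
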